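-- pv_equiv track=rewrite | github.com/kanngji/thisisCodingTest | programmers/lv2/5.py | solution
-- ===== SOURCE A (Python) =====
-- def solution(s):
--     answer = -1
--
--     # [실행] 버튼을 누르면 출력 값을 볼 수 있습니다.
--     stack=[]
--     for i in s:
--         if len(stack)==0:
--             stack.append(i)
--
--         elif stack[-1]!=i:
--             stack.append(i)
--         else:
--             stack.append(i)
--             stack.pop()
--             stack.pop()
--     if len(stack)==0:
--         answer= 1
--     else:
--         answer=0
--     return answer
-- ===== SOURCE B (Python) =====
-- def solution(s):
--     # Repeatedly remove all (non-overlapping, left-to-right) adjacent equal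
--     # pairs in whole-string passes until a fixed point is reached.
--     while True:
--         out = []
--         i = 0
--         while i < len(s):
--             if i + 1 < len(s) and s[i] == s[i + 1]:
--                 i += 2
--             else:
--                 out.append(s[i])
--                 i += 1
--         t = ''.join(out)
--         if t == s:
--             break
--         s = t
--     return 1 if s == '' else 0
-- ===== Notes on version B (the rewrite author's own statement) =====
-- stated objective: alternative
-- what changed: Replaces the single stack pass with a fixpoint rewrite: repeated whole-string passes each deleting left-to-right non-overlapping adjacent equal pairs until the string stops changing (emptiness of the unique normal form equals the stack result).
import Mathlib
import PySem

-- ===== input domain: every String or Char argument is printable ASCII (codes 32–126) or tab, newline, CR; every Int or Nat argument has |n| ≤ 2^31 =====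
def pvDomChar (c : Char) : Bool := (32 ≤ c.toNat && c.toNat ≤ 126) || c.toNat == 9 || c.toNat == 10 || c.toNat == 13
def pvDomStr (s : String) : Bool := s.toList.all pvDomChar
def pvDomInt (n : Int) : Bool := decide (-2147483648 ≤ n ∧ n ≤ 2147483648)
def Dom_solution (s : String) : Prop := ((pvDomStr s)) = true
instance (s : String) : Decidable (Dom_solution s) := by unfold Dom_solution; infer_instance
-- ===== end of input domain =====

-- B replaces the single stack pass with repeated whole-string passes removing adjacent
-- equal pairs until a fixed point; equivalence is the uniqueness of the normal form.

-- ===== PORT A =====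
-- one loop step: push i; if the previous top equalled i, pop the pair back off
def stepA (stack : List Char) (i : Char) : List Char :=
  if stack.length == 0 then i :: stack
  else if stack.head! ≠ i then i :: stack
  else ((i :: stack).tail).tail      -- append(i); pop(); pop()

def solution (s : String) : Int :=
  let stack := s.toList.foldl stepA []
  if stack.length == 0 then 1 else 0

-- ===== PORT B =====
-- one whole-string pass: delete left-to-right non-overlapping adjacent equal pairs
def removeOnce : List Char → List Char
  | a :: b :: t => if a = b then removeOnce t else a :: removeOnce (b :: t)
  | l => l


theorem removeOnce_length_le (l : List Char) : (removeOnce l).length ≤ l.length := by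
  induction l using removeOnce.induct with
  | case1 b t ih => simp [removeOnce]; omega
  | case2 a b t hne ih => simp only [removeOnce, if_neg hne]; simpa using ih
  | case3 l h =>
      cases l with
      | nil => simp [removeOnce]
      | cons a t =>
          cases t with
          | nil => simp [removeOnce]
          | cons b t2 => exact absurd rfl (h a b t2)

theorem removeOnce_length_lt (l : List Char) (h : removeOnce l ≠ l) :
    (removeOnce l).length < l.length := by
  induction l using removeOnce.induct with
  | case1 b t ih =>
      have := removeOnce_length_le t; simp [removeOnce]; omega
  | case2 a b t hne ih =>
      simp only [removeOnce, if_neg hne] at h ⊢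
      have hne2 : removeOnce (b :: t) ≠ b :: t := by
        intro he; exact h (by rw [he])
      simpa using ih hne2
  | case3 l hl =>
      exfalso
      cases l with
      | nil => simp [removeOnce] at h
      | cons a t =>
          cases t with
          | nil => simp [removeOnce] at h
          | cons b t2 => exact hl a b t2 rfl

-- repeat the pass until the string stops changing
def reduceFix (l : List Char) : List Char :=
  let l' := removeOnce l
  if h : l' = l then l else reduceFix l'
termination_by l.length
decreasing_by exact removeOnce_length_lt l h

def solution_alt (s : String) : Int :=
  if reduceFix s.toList = [] then 1 else 0

-- ===== PRECONDITION & SPEC =====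
def Spec_solution (s : String) (out : Int) : Prop := out = solution_alt s
instance (s : String) (out : Int) : Decidable (Spec_solution s out) := by unfold Spec_solution; infer_instance

-- ===== CLAIM (what is proved, stated in full; the proofs are below) =====
def Claim_equal_solution : Prop := ∀ (s : String), Dom_solution s → Spec_solution s (solution s)

-- ===== LEMMAS AND PROOFS =====

-- no two adjacent equal characters
def noAdj : List Char → Bool
  | a :: b :: t => !(a = b) && noAdj (b :: t)
  | _ => true

theorem stepA_nil (i : Char) : stepA [] i = [i] := rfl

theorem stepA_cons (h : Char) (t : List Char) (i : Char) :
    stepA (h :: t) i = if h = i then t else i :: h :: t := by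
  by_cases hhi : h = i <;> simp [stepA, hhi]

theorem noAdj_tail {a : Char} {t : List Char} (h : noAdj (a :: t) = true) : noAdj t = true := by
  cases t with
  | nil => simp [noAdj]
  | cons b t2 => simp [noAdj] at h; exact h.2

theorem noAdj_stepA {st : List Char} (i : Char) (h : noAdj st = true) :
    noAdj (stepA st i) = true := by
  cases st with
  | nil => simp [stepA_nil, noAdj]
  | cons a t =>
      rw [stepA_cons]
      by_cases hai : a = i
      · rw [if_pos hai]; exact noAdj_tail h
      · rw [if_neg hai]
        simp only [noAdj, Bool.and_eq_true, Bool.not_eq_true', decide_eq_false_iff_not]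
        exact ⟨fun he => hai he.symm, h⟩

theorem stepA_cancel {st : List Char} (a : Char) (h : noAdj st = true) :
    stepA (stepA st a) a = st := by
  cases st with
  | nil => simp [stepA_nil, stepA_cons]
  | cons b t =>
      rw [stepA_cons]
      by_cases hba : b = a
      · rw [if_pos hba]
        subst hba
        cases t with
        | nil => simp [stepA_nil]
        | cons c t2 =>
            simp only [noAdj, Bool.and_eq_true, Bool.not_eq_true', decide_eq_false_iff_not] at h
            rw [stepA_cons, if_neg (fun he => h.1 he.symm)]
      · rw [if_neg hba, stepA_cons, if_pos rfl]

theorem foldl_removeOnce (l : List Char) :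
    ∀ acc : List Char, noAdj acc = true →
      List.foldl stepA acc (removeOnce l) = List.foldl stepA acc l := by
  induction l using removeOnce.induct with
  | case1 b t ih =>
      intro acc hacc
      simp only [removeOnce, List.foldl]
      rw [show stepA (stepA acc b) b = acc from stepA_cancel b hacc]
      exact ih acc hacc
  | case2 a b t hne ih =>
      intro acc hacc
      simp only [removeOnce, if_neg hne, List.foldl]
      exact ih (stepA acc a) (noAdj_stepA a hacc)
  | case3 l h =>
      intro acc _
      cases l with
      | nil => rfl
      | cons a t =>
          cases t with
          | nil => rfl
          | cons b t2 => exact absurd rfl (h a b t2)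

theorem removeOnce_fix_noAdj (l : List Char) (h : removeOnce l = l) : noAdj l = true := by
  induction l using removeOnce.induct with
  | case1 b t ih =>
      exfalso
      have hle : (removeOnce t).length ≤ t.length := removeOnce_length_le t
      have hlen : (removeOnce (b :: b :: t)).length = t.length + 2 := by rw [h]; simp
      simp [removeOnce] at hlen
      omega
  | case2 a b t hne ih =>
      simp only [removeOnce, if_neg hne, List.cons.injEq, true_and] at h
      simp only [noAdj, Bool.and_eq_true, Bool.not_eq_true', decide_eq_false_iff_not]
      exact ⟨hne, ih h⟩
  | case3 l hl =>
      cases l with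
      | nil => simp [noAdj]
      | cons a t =>
          cases t with
          | nil => simp [noAdj]
          | cons b t2 => exact absurd rfl (hl a b t2)

-- a pair-free suffix just gets pushed: the stack ends as its reverse on top of acc
theorem foldl_noAdj :
    ∀ (l acc : List Char), noAdj l = true →
      (∀ c h tl ta, l = c :: tl → acc = h :: ta → c ≠ h) →
      List.foldl stepA acc l = l.reverse ++ acc := by
  intro l
  induction l with
  | nil => intro acc _ _; simp
  | cons c t ih =>
      intro acc hna hcomp
      have hstep : stepA acc c = c :: acc := by
        cases acc with
        | nil => exact stepA_nil c
        | cons h ta =>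
            rw [stepA_cons, if_neg (fun he => hcomp c h t ta rfl rfl he.symm)]
      simp only [List.foldl, hstep]
      rw [ih (c :: acc) (noAdj_tail hna) ?_]
      · simp
      · intro d h tl ta ht hacc
        cases t with
        | nil => simp at ht
        | cons b t3 =>
            simp only [noAdj, Bool.and_eq_true, Bool.not_eq_true', decide_eq_false_iff_not] at hna
            simp only [List.cons.injEq] at ht hacc
            rw [← ht.1, ← hacc.1]
            exact fun he => hna.1 he.symm

theorem reduceFix_fold (l : List Char) :
    List.foldl stepA [] (reduceFix l) = List.foldl stepA [] l := by
  rw [reduceFix]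
  by_cases hfix : removeOnce l = l
  · rw [dif_pos hfix]
  · rw [dif_neg hfix]
    rw [reduceFix_fold (removeOnce l)]
    exact foldl_removeOnce l [] rfl
termination_by l.length
decreasing_by exact removeOnce_length_lt l hfix

theorem reduceFix_isFix (l : List Char) : removeOnce (reduceFix l) = reduceFix l := by
  rw [reduceFix]
  by_cases hfix : removeOnce l = l
  · rw [dif_pos hfix]; exact hfix
  · rw [dif_neg hfix]; exact reduceFix_isFix (removeOnce l)
termination_by l.length
decreasing_by exact removeOnce_length_lt l hfix

-- ===== VERDICT (by name: the statement is the Claim_ definition above) =====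
theorem solution_spec : Claim_equal_solution := by
  intro s _
  unfold Spec_solution solution solution_alt
  have hfold : List.foldl stepA [] s.toList = (reduceFix s.toList).reverse ++ [] := by
    rw [← reduceFix_fold s.toList]
    exact foldl_noAdj (reduceFix s.toList) []
      (removeOnce_fix_noAdj (reduceFix s.toList) (reduceFix_isFix s.toList))
      (by intro c h tl ta _ hacc; simp at hacc)
  simp only [hfold, List.append_nil]
  cases hN : reduceFix s.toList with
  | nil => simp
  | cons a t => simp
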